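-- pv_equiv track=rewrite | github.com/chrisvibe/adventofcode | day6.py | find_rightmost_index_of_first_unique_char_sequence_in_string
-- ===== SOURCE A (Python) =====
-- def find_rightmost_index_of_first_unique_char_sequence_in_string(string, sequence_length=4):
--     sequence = []
--     for i in range(len(string)):
--         c = string[i]
--         n = "".join(sequence).find(c)
--         sequence.append(c)
--         if n != -1:
--             del sequence[:n+1]
--         elif len(sequence) == sequence_length:
--             return i, ''.join(sequence)
--     return -1, ''
-- ===== SOURCE B (Python) =====
-- def find_rightmost_index_of_first_unique_char_sequence_in_string(string, sequence_length=4):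
--     if sequence_length < 1:
--         return -1, ''
--     for i in range(sequence_length - 1, len(string)):
--         window = string[i - sequence_length + 1:i + 1]
--         if len(set(window)) == sequence_length:
--             return i, window
--     return -1, ''
-- ===== Notes on version B (the rewrite author's own statement) =====
-- stated objective: simpler
-- what changed: Replaced A's incremental window maintenance (a growing char list rebuilt with join, scanned with find and prefix-deleted on duplicates) by a direct brute-force scan: for each candidate end index take the length-L slice and test distinctness with set(), returning the first hit.
import Mathlib
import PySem

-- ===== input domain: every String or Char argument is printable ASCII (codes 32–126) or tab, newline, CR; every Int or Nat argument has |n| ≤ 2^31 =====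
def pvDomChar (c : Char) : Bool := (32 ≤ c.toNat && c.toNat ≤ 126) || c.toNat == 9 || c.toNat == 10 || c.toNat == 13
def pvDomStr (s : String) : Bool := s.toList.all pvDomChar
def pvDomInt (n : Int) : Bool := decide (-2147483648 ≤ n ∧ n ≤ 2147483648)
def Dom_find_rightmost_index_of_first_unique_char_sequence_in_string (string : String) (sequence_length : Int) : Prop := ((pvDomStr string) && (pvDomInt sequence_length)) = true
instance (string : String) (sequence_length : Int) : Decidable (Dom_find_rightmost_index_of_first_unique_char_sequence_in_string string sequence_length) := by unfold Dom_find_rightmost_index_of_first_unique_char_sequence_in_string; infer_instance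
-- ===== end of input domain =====

-- B replaces A's incremental window maintenance (join + find + prefix deletion on a char list)
-- by a direct brute-force scan: for each candidate end index take the length-L slice and test
-- distinctness with set(); same cost class, but a plainer two-line loop.

-- ===== PORT A =====
-- The Python loop 'for i in range(len(string)): c = string[i]' is driven by the (index, char)
-- pairs of the string (state = the 'sequence' list); '"".join(sequence).find(c)' is the index
-- of the first occurrence of c in the char list 'sequence' (exact: find on a joined char list).
def find_A_go (seqlen : Int) (sequence : List Char) : List (Int × Char) → Int × String
  | [] => (-1, "")
  | (i, c) :: rest =>
    match PySem.List.index? sequence c with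
    | some n => find_A_go seqlen ((sequence ++ [c]).drop (n + 1)) rest
    | none =>
      if ((sequence ++ [c]).length : Int) = seqlen then (i, String.ofList (sequence ++ [c]))
      else find_A_go seqlen (sequence ++ [c]) rest

def find_rightmost_index_of_first_unique_char_sequence_in_string (string : String) (sequence_length : Int) : Int × String :=
  find_A_go sequence_length [] (PySem.List.enumerate string.toList 0)

-- ===== PORT B =====
-- 'for i in range(sequence_length - 1, len(string)): window = string[i-sequence_length+1:i+1];
--  if len(set(window)) == sequence_length: return i, window' / 'return -1, ""'
def find_B_loop (seqlen : Int) (s : List Char) : List Int → Int × String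
  | [] => (-1, "")
  | i :: rest =>
    let w := PySem.List.slice s (some (i - seqlen + 1)) (some (i + 1))
    if (((PySem.Set.ofList w).length : Int) = seqlen) then (i, String.ofList w)
    else find_B_loop seqlen s rest

def find_rightmost_index_of_first_unique_char_sequence_in_string_alt (string : String) (sequence_length : Int) : Int × String :=
  if sequence_length < 1 then (-1, "")
  else find_B_loop sequence_length string.toList
    (PySem.List.pyRange (sequence_length - 1) (PySem.Str.len string) 1)

-- ===== PRECONDITION & SPEC =====
def Spec_find_rightmost_index_of_first_unique_char_sequence_in_string (string : String) (sequence_length : Int) (out : Int × String) : Prop := out = find_rightmost_index_of_first_unique_char_sequence_in_string_alt string sequence_length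
instance (string : String) (sequence_length : Int) (out : Int × String) : Decidable (Spec_find_rightmost_index_of_first_unique_char_sequence_in_string string sequence_length out) := by unfold Spec_find_rightmost_index_of_first_unique_char_sequence_in_string; infer_instance

-- ===== CLAIM (what is proved, stated in full; the proofs are below) =====
def Claim_equal_find_rightmost_index_of_first_unique_char_sequence_in_string : Prop := ∀ (string : String) (sequence_length : Int), Dom_find_rightmost_index_of_first_unique_char_sequence_in_string string sequence_length → Spec_find_rightmost_index_of_first_unique_char_sequence_in_string string sequence_length (find_rightmost_index_of_first_unique_char_sequence_in_string string sequence_length)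

-- ===== LEMMAS AND PROOFS =====

-- set(xs) keeps a sublist of xs (first occurrences in order)
lemma ofList_sublist {α : Type} [BEq α] [LawfulBEq α] (xs : List α) :
    (PySem.Set.ofList xs).Sublist xs := by
  induction xs with
  | nil => simp [PySem.Set.ofList_nil]
  | cons x xs ih =>
    rw [PySem.Set.ofList_cons]
    refine List.Sublist.cons₂ x (List.Sublist.trans ?_ ih)
    have : PySem.Set.discard (PySem.Set.ofList xs) x
        = (PySem.Set.ofList xs).filter (fun y => !(y == x)) := rfl
    rw [this]
    exact List.filter_sublist

-- len(set(w)) = len(w) exactly when w has no duplicates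
lemma ofList_length_eq_iff {α : Type} [BEq α] [LawfulBEq α] (xs : List α) :
    (PySem.Set.ofList xs).length = xs.length ↔ xs.Nodup := by
  constructor
  · intro h
    have := (ofList_sublist xs).eq_of_length h
    rw [← this]
    exact PySem.Set.nodup_ofList xs
  · intro h
    rw [PySem.Set.ofList_eq_self_of_nodup xs h]

-- A never returns through the length test when sequence_length ≤ 0
lemma find_A_go_nonpos (seqlen : Int) (hL : seqlen ≤ 0) :
    ∀ (l : List (Int × Char)) (seq : List Char), find_A_go seqlen seq l = (-1, "") := by
  intro l
  induction l with
  | nil => intro seq; simp [find_A_go]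
  | cons p rest ih =>
    intro seq
    obtain ⟨i, c⟩ := p
    simp only [find_A_go]
    cases PySem.List.index? seq c with
    | some n => exact ih _
    | none =>
      have : ¬ (((seq ++ [c]).length : Int) = seqlen) := by
        simp only [List.length_append, List.length_cons, List.length_nil]
        omega
      rw [if_neg this]
      exact ih _

-- consume one failing candidate of B's range (or none, if the range has not started)
lemma B_skip (LN : Nat) (s : List Char) (k : Nat) (hk : k < s.length)
    (hbad : LN ≤ k + 1 → ¬ ((s.drop (k + 1 - LN)).take LN).Nodup) :
    find_B_loop (LN : Int) s (PySem.List.pyRange (max ((LN : Int) - 1) (k : Int)) (s.length : Int) 1) =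
    find_B_loop (LN : Int) s (PySem.List.pyRange (max ((LN : Int) - 1) ((k : Int) + 1)) (s.length : Int) 1) := by
  by_cases hcase : (LN : Int) - 1 ≤ (k : Int)
  · have hLk : LN ≤ k + 1 := by omega
    have hmax1 : max ((LN : Int) - 1) (k : Int) = (k : Int) := by omega
    have hmax2 : max ((LN : Int) - 1) ((k : Int) + 1) = (k : Int) + 1 := by omega
    rw [hmax1, hmax2]
    rw [PySem.List.pyRange_one_cons (by exact_mod_cast hk)]
    simp only [find_B_loop]
    have hstart : (k : Int) - (LN : Int) + 1 = ((k + 1 - LN : Nat) : Int) := by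
      push_cast [Nat.cast_sub hLk]; ring
    have hend : (k : Int) + 1 = ((k + 1 : Nat) : Int) := by push_cast; ring
    rw [hstart, hend, PySem.List.slice_natCast]
    have htk : k + 1 - (k + 1 - LN) = LN := by omega
    rw [htk]
    set w := (s.drop (k + 1 - LN)).take LN with hw
    have hwlen : w.length = LN := by
      rw [hw, List.length_take, List.length_drop]
      omega
    have hne : ¬ (((PySem.Set.ofList w).length : Int) = (LN : Int)) := by
      intro h
      have hlen : (PySem.Set.ofList w).length = LN := by exact_mod_cast h
      exact hbad hLk ((ofList_length_eq_iff w).mp (by rw [hlen, hwlen]))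
    rw [if_neg hne]
  · have hmax1 : max ((LN : Int) - 1) (k : Int) = (LN : Int) - 1 := by omega
    have hmax2 : max ((LN : Int) - 1) ((k : Int) + 1) = (LN : Int) - 1 := by omega
    rw [hmax1, hmax2]

-- ¬Nodup from two positions holding the same element
lemma not_nodup_of_two_pos {α : Type} [DecidableEq α] (l : List α) (a b : Nat) (c : α)
    (hab : a < b) (hb : b < l.length) (ha : l[a]? = some c) (hbv : l[b]? = some c) :
    ¬ l.Nodup := by
  intro hnd
  have := List.getElem?_inj (xs := l) (by omega : a < l.length) hnd (ha.trans hbv.symm)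
  omega

-- main induction: A's incremental window walk = B's brute-force candidate scan
lemma go_eq (LN : Nat) (hL : 1 ≤ LN) (s : List Char) :
    ∀ (t : List Char) (k left : Nat),
      s.drop k = t → left ≤ k →
      ((s.take k).drop left).Nodup →
      k - left < LN →
      (∀ j : Nat, j < left → ¬ ((s.take k).drop j).Nodup) →
      find_A_go (LN : Int) ((s.take k).drop left) (PySem.List.enumerate t (k : Int)) =
      find_B_loop (LN : Int) s (PySem.List.pyRange (max ((LN : Int) - 1) (k : Int)) (s.length : Int) 1) := by
  intro t
  induction t with
  | nil =>
    intro k left hdrop _ _ _ _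
    have hk : s.length ≤ k := by
      by_contra h
      rw [Nat.not_le] at h
      have := List.drop_eq_nil_iff.mp hdrop
      omega
    rw [PySem.List.pyRange_one_eq_nil (by omega)]
    simp [PySem.List.enumerate_nil, find_A_go, find_B_loop]
  | cons c t ih =>
    intro k left hdrop hlk hnd hwin hmax
    have hk : k < s.length := by
      by_contra h
      rw [Nat.not_lt] at h
      rw [List.drop_eq_nil_of_le h] at hdrop
      exact List.cons_ne_nil c t hdrop.symm
    have hsk : s[k]? = some c := by
      have h0 : (s.drop k)[0]? = some c := by rw [hdrop]; rfl
      rwa [List.getElem?_drop, Nat.add_zero] at h0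
    have hdrop' : s.drop (k + 1) = t := by
      have h1 : s.drop (k + 1) = (s.drop k).drop 1 := by rw [List.drop_drop]
      rw [h1, hdrop, List.drop_one, List.tail_cons]
    have htklen : (s.take k).length = k := by
      rw [List.length_take]; omega
    have hwlen : ((s.take k).drop left).length = k - left := by
      rw [List.length_drop, htklen]
    have htake1 : s.take (k + 1) = s.take k ++ [c] := by
      rw [List.take_add_one, hsk]; rfl
    have happ : (s.take k).drop left ++ [c] = (s.take (k + 1)).drop left := by
      rw [htake1, List.drop_append_of_le_length (by omega)]
    -- lifting the maximality invariant one step when 'left' is unchanged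
    have hmax_lift : ∀ j : Nat, j < left → ¬ ((s.take (k + 1)).drop j).Nodup := by
      intro j hj hngood
      refine hmax j hj ?_
      have : (s.take k).drop j ++ [c] = (s.take (k + 1)).drop j := by
        rw [htake1, List.drop_append_of_le_length (by omega)]
      rw [← this] at hngood
      exact hngood.sublist (List.sublist_append_left _ _)
    rw [PySem.List.enumerate_cons]
    simp only [find_A_go]
    have hcast1 : (k : Int) + 1 = ((k + 1 : Nat) : Int) := by push_cast; ring
    cases hidx : PySem.List.index? ((s.take k).drop left) c with
    | some n₀ =>
      -- duplicate: A deletes the window prefix through the match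
      dsimp only
      obtain ⟨hn₀lt, hn₀val, hn₀min⟩ := PySem.List.getElem_of_index?_eq_some hidx
      have hn₀lt' : n₀ < k - left := by rwa [hwlen] at hn₀lt
      have hsj : s[left + n₀]? = some c := by
        have := List.getElem?_eq_getElem hn₀lt
        rw [hn₀val, List.getElem?_drop, List.getElem?_take, if_pos (by omega)] at this
        exact this
      -- A's new window is (s.take (k+1)).drop (left + n₀ + 1)
      have hAseq : ((s.take k).drop left ++ [c]).drop (n₀ + 1)
          = (s.take (k + 1)).drop (left + n₀ + 1) := by
        rw [happ, List.drop_drop]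
        try congr 1
        try omega
      rw [hAseq]
      -- invariants at the new state
      have hnd' : ((s.take (k + 1)).drop (left + n₀ + 1)).Nodup := by
        have h1 : (s.take (k + 1)).drop (left + n₀ + 1)
            = ((s.take k).drop left).drop (n₀ + 1) ++ [c] := by
          rw [← hAseq, List.drop_append_of_le_length (by rw [hwlen]; omega)]
        rw [h1, List.nodup_append]
        refine ⟨hnd.sublist (List.drop_sublist _ _), List.nodup_singleton c, ?_⟩
        intro x hx y hy
        rw [List.mem_singleton] at hy
        subst hy
        intro hxy
        subst hxy
        obtain ⟨m, hm⟩ := List.mem_iff_getElem?.mp hx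
        rw [List.getElem?_drop] at hm
        have hm' : ((s.take k).drop left)[n₀]? = ((s.take k).drop left)[n₀ + 1 + m]? := by
          rw [hm, List.getElem?_eq_getElem hn₀lt, hn₀val]
        have := List.getElem?_inj (xs := (s.take k).drop left)
          (by omega : n₀ < ((s.take k).drop left).length) hnd hm'
        omega
      have hmax' : ∀ j : Nat, j < left + n₀ + 1 → ¬ ((s.take (k + 1)).drop j).Nodup := by
        intro j hj
        by_cases hjl : j < left
        · exact hmax_lift j hjl
        · -- positions (left+n₀) and k both hold c inside s.take (k+1)
          rw [not_lt] at hjl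
          refine not_nodup_of_two_pos _ (left + n₀ - j) (k - j) c (by omega)
            (by rw [List.length_drop, List.length_take]; omega) ?_ ?_
          · rw [List.getElem?_drop, List.getElem?_take, if_pos (by omega)]
            rw [show j + (left + n₀ - j) = left + n₀ by omega]
            exact hsj
          · rw [List.getElem?_drop, List.getElem?_take, if_pos (by omega)]
            rw [show j + (k - j) = k by omega]
            exact hsk
      have hwin' : k + 1 - (left + n₀ + 1) < LN := by omega
      have hskip := B_skip LN s k hk (by
        intro hLk hgood
        have heq : (s.drop (k + 1 - LN)).take LN = (s.take (k + 1)).drop (k + 1 - LN) := by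
          rw [List.drop_take, show k + 1 - (k + 1 - LN) = LN by omega]
        rw [heq] at hgood
        exact hmax' (k + 1 - LN) (by omega) hgood)
      rw [hcast1]
      rw [ih (k + 1) (left + n₀ + 1) hdrop' (by omega) hnd' hwin' hmax']
      rw [hcast1] at hskip
      rw [← hskip]
    | none =>
      -- fresh char: window grows by one
      dsimp only
      have hcnot : c ∉ (s.take k).drop left := (PySem.List.index?_eq_none_iff _ _).mp hidx
      have hnd' : ((s.take (k + 1)).drop left).Nodup := by
        rw [← happ, List.nodup_append]
        refine ⟨hnd, List.nodup_singleton c, ?_⟩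
        intro x hx y hy
        rw [List.mem_singleton] at hy
        subst hy
        intro hxy
        subst hxy
        exact hcnot hx
      have hlen1 : (((s.take k).drop left ++ [c]).length : Int) = ((k : Int) - left) + 1 := by
        simp only [List.length_append, List.length_cons, List.length_nil, hwlen]
        push_cast [Nat.cast_sub hlk]
        ring
      by_cases hret : k - left + 1 = LN
      · -- A returns here; B's current candidate is exactly i = k and its slice is A's window
        have hcond : (((s.take k).drop left ++ [c]).length : Int) = (LN : Int) := by
          rw [hlen1]
          omega
        rw [if_pos hcond]
        have hmaxk : max ((LN : Int) - 1) (k : Int) = (k : Int) := by omega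
        rw [hmaxk, PySem.List.pyRange_one_cons (by exact_mod_cast hk)]
        simp only [find_B_loop]
        have hslice : PySem.List.slice s (some ((k : Int) - (LN : Int) + 1)) (some ((k : Int) + 1))
            = (s.take k).drop left ++ [c] := by
          have hstart : (k : Int) - (LN : Int) + 1 = ((left : Nat) : Int) := by
            push_cast [← hret, Nat.cast_sub hlk]; ring
          rw [hstart, hcast1, PySem.List.slice_natCast, happ, List.drop_take]
        rw [hslice]
        have hwnodup : ((s.take k).drop left ++ [c]).Nodup := by rw [happ]; exact hnd'
        rw [PySem.Set.ofList_eq_self_of_nodup _ hwnodup]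
        rw [if_pos hcond]
      · -- window still shorter than the target: recurse
        have hcond : ¬ ((((s.take k).drop left ++ [c]).length : Int) = (LN : Int)) := by
          rw [hlen1]
          omega
        rw [if_neg hcond, happ, hcast1]
        have hwin' : k + 1 - left < LN := by omega
        have hskip := B_skip LN s k hk (by
          intro hLk hgood
          have heq : (s.drop (k + 1 - LN)).take LN = (s.take (k + 1)).drop (k + 1 - LN) := by
            rw [List.drop_take, show k + 1 - (k + 1 - LN) = LN by omega]
          rw [heq] at hgood
          have hj : k + 1 - LN < left := by omega
          exact hmax_lift (k + 1 - LN) hj hgood)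
        rw [ih (k + 1) left hdrop' (by omega) hnd' hwin' hmax_lift]
        rw [hcast1] at hskip
        rw [← hskip]

-- ===== VERDICT (by name: the statement is the Claim_ definition above) =====
-- ===== VERDICT (by name: the statement is the Claim_ definition above) =====
theorem find_rightmost_index_of_first_unique_char_sequence_in_string_spec : Claim_equal_find_rightmost_index_of_first_unique_char_sequence_in_string := by
  intro string seqlen _
  unfold Spec_find_rightmost_index_of_first_unique_char_sequence_in_string
  unfold find_rightmost_index_of_first_unique_char_sequence_in_string
  unfold find_rightmost_index_of_first_unique_char_sequence_in_string_alt
  by_cases hpos : seqlen < 1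
  · -- degenerate sequence_length ≤ 0: A scans without ever matching, B returns at once
    rw [if_pos hpos, find_A_go_nonpos seqlen (by omega) _ _]
  · -- main case: sequence_length ≥ 1
    rw [if_neg hpos]
    rw [not_lt] at hpos
    set LN := seqlen.toNat with hLN
    have hseq : seqlen = (LN : Int) := by omega
    rw [hseq]
    have h := go_eq LN (by omega) string.toList string.toList 0 0 rfl (Nat.le_refl 0)
      (by simp) (by omega) (by intro j hj; omega)
    simp only [List.take_zero, List.drop_nil] at h
    have hmax0 : max ((LN : Int) - 1) ((0 : Nat) : Int) = (LN : Int) - 1 := by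
      push_cast; omega
    rw [hmax0] at h
    rw [PySem.Str.len_eq]
    simpa using h
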